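-- pv_equiv track=rewrite | github.com/wwhtrbbtt/AOC22 | 4/solution.py | isFullyContained
-- ===== SOURCE A (Python) =====
-- partTwo = False
--
-- def isFullyContained(s1, s2, r=True):
--     contain=True
--     for i in s1:
--         if i not in s2:
--             contain=False
--             if not partTwo: break
--         elif partTwo: return True
--
--     if contain: return True
--     if r: return isFullyContained(s2, s1, r=False)
-- ===== SOURCE B (Python) =====
-- partTwo = False
--
-- def _merge_subset(x, y):
--     # x, y strictly increasing sorted lists; True iff every element of x occurs in y
--     j = 0
--     for v in x:
--         while j < len(y) and y[j] < v:
--             j += 1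
--         if j >= len(y) or y[j] != v:
--             return False
--     return True
--
-- def isFullyContained(s1, s2, r=True):
--     # Sort-then-scan: dedup+sort both sides once, then subset tests by two-pointer merge.
--     x = sorted(set(s1))
--     y = sorted(set(s2))
--     if _merge_subset(x, y) or (r and _merge_subset(y, x)):
--         return True
--     return None
-- ===== Notes on version B (the rewrite author's own statement) =====
-- stated objective: alternative
-- what changed: Replaces A's membership loop with break plus a swapped recursive self-call by sorting the deduplicated values of each side once and deciding subset/superset with a two-pointer merge scan over the sorted lists.
import Mathlib
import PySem

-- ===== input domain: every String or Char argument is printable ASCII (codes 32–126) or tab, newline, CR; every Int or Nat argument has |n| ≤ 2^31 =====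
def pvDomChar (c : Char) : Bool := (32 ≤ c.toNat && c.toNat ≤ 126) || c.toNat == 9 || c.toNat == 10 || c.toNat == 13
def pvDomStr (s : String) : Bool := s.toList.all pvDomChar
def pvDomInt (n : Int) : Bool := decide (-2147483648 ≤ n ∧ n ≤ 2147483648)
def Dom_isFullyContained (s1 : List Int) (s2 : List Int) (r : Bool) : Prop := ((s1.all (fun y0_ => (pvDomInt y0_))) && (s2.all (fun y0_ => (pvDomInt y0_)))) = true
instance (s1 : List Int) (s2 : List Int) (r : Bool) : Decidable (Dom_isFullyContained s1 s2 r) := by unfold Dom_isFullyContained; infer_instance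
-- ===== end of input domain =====

-- B replaces A's flag-driven membership loop + swapped recursive self-call by
-- sorting the deduplicated values once and deciding subset by a two-pointer merge scan.

-- ===== PORT A =====
-- module constant 'partTwo = False'
def partTwoA : Bool := false

-- the 'for i in s1' loop: Sum.inl v = early 'return' from the loop body, Sum.inr contain = loop ended
def aLoop (s2 : List Int) (contain : Bool) : List Int → Sum (Option Bool) Bool
  | [] => Sum.inr contain
  | i :: rest =>
      if ¬ (s2.contains i) then
        (if ¬ partTwoA then Sum.inr false else aLoop s2 false rest)
      else if partTwoA then Sum.inl (some true)
      else aLoop s2 contain rest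

def isFullyContained (s1 : List Int) (s2 : List Int) (r : Bool) : Option Bool :=
  match aLoop s2 true s1 with
  | Sum.inl v => v
  | Sum.inr contain =>
      if contain then some true
      else if h : r = true then isFullyContained s2 s1 false
      else none
termination_by (if r then 1 else 0)
decreasing_by simp [h]

-- ===== PORT B =====
-- _merge_subset: two-pointer scan over strictly increasing lists
-- (the 'while j < len(y) and y[j] < v: j += 1' advance is the 'w < v' branch)
def mergeSubset (x y : List Int) : Bool :=
  match x, y with
  | [], _ => true
  | _ :: _, [] => false
  | v :: vs, w :: ws =>
      if w < v then mergeSubset (v :: vs) ws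
      else if w = v then mergeSubset vs (w :: ws)
      else false
termination_by x.length + y.length

def isFullyContained_alt (s1 : List Int) (s2 : List Int) (r : Bool) : Option Bool :=
  let x := PySem.List.sorted (PySem.Set.ofList s1) (fun a => a) false
  let y := PySem.List.sorted (PySem.Set.ofList s2) (fun a => a) false
  if mergeSubset x y || (r && mergeSubset y x) then some true else none

-- ===== PRECONDITION & SPEC =====
def Spec_isFullyContained (s1 : List Int) (s2 : List Int) (r : Bool) (out : Option Bool) : Prop := out = isFullyContained_alt s1 s2 r
instance (s1 : List Int) (s2 : List Int) (r : Bool) (out : Option Bool) : Decidable (Spec_isFullyContained s1 s2 r out) := by unfold Spec_isFullyContained; infer_instance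

-- ===== CLAIM (what is proved, stated in full; the proofs are below) =====
def Claim_equal_isFullyContained : Prop := ∀ (s1 : List Int) (s2 : List Int) (r : Bool), Dom_isFullyContained s1 s2 r → Spec_isFullyContained s1 s2 r (isFullyContained s1 s2 r)

-- ===== LEMMAS AND PROOFS =====

-- with partTwo = False, A's loop computes 'all elements of s1 are in s2'
theorem aLoop_eq (s2 s1 : List Int) :
    aLoop s2 true s1 = Sum.inr (s1.all (fun i => s2.contains i)) := by
  induction s1 with
  | nil => rfl
  | cons i rest ih =>
      simp only [aLoop, partTwoA, List.all_cons]
      by_cases h : i ∈ s2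
      · simp [h, ih]
      · simp [h]

-- the two-pointer merge over strictly increasing lists decides subset membership
theorem mergeSubset_iff (x y : List Int)
    (hx : x.Pairwise (· < ·)) (hy : y.Pairwise (· < ·)) :
    mergeSubset x y = true ↔ ∀ a ∈ x, a ∈ y := by
  induction x, y using mergeSubset.induct with
  | case1 y => simp [mergeSubset]
  | case2 v vs =>
      simp only [mergeSubset]
      constructor
      · intro h; cases h
      · intro h; exact absurd (h v List.mem_cons_self) List.not_mem_nil
  | case3 v vs w ws hlt ih =>
      rw [mergeSubset, if_pos hlt, ih hx (List.Pairwise.of_cons hy)]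
      constructor
      · intro h a ha; exact List.mem_cons_of_mem _ (h a ha)
      · intro h a ha
        rcases List.mem_cons.mp (h a ha) with rfl | h2
        · exfalso
          rcases List.mem_cons.mp ha with rfl | h3
          · exact absurd hlt (lt_irrefl _)
          · exact absurd (lt_trans hlt (List.rel_of_pairwise_cons hx h3)) (lt_irrefl _)
        · exact h2
  | case4 vs w ws hlt ih =>
      rw [mergeSubset, if_neg hlt, if_pos rfl, ih (List.Pairwise.of_cons hx) hy]
      constructor
      · intro h a ha
        rcases List.mem_cons.mp ha with rfl | h2
        · exact List.mem_cons_self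
        · exact h a h2
      · intro h a ha; exact h a (List.mem_cons_of_mem _ ha)
  | case5 v vs w ws hlt hne =>
      have hwv : w > v := lt_of_le_of_ne (le_of_not_gt hlt) (Ne.symm hne)
      simp only [mergeSubset, if_neg hlt, if_neg hne]
      constructor
      · intro h; cases h
      · intro h
        have hv := h v List.mem_cons_self
        rcases List.mem_cons.mp hv with rfl | h2
        · exact absurd hwv (lt_irrefl _)
        · exact absurd (lt_trans hwv (List.rel_of_pairwise_cons hy h2)) (lt_irrefl _)

-- merge of the sorted deduplicated lists = the plain 'all members' test
theorem mergeSubset_sorted_eq (s1 s2 : List Int) :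
    mergeSubset (PySem.List.sorted (PySem.Set.ofList s1) (fun a => a) false)
                (PySem.List.sorted (PySem.Set.ofList s2) (fun a => a) false)
      = s1.all (fun i => s2.contains i) := by
  rw [Bool.eq_iff_iff,
      mergeSubset_iff _ _ (PySem.List.sorted_ofList_pairwise_lt s1) (PySem.List.sorted_ofList_pairwise_lt s2)]
  simp [List.all_eq_true, PySem.List.mem_sorted, PySem.Set.mem_ofList]

theorem main_eq_false (s1 s2 : List Int) :
    isFullyContained s1 s2 false = isFullyContained_alt s1 s2 false := by
  rw [isFullyContained, aLoop_eq]
  simp only [isFullyContained_alt, mergeSubset_sorted_eq]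
  by_cases h1 : s1.all (fun i => s2.contains i) = true <;> simp [h1]

theorem main_eq (r : Bool) (s1 s2 : List Int) :
    isFullyContained s1 s2 r = isFullyContained_alt s1 s2 r := by
  cases r with
  | false => exact main_eq_false s1 s2
  | true =>
      rw [isFullyContained, aLoop_eq]
      simp only [main_eq_false, isFullyContained_alt, mergeSubset_sorted_eq]
      by_cases h1 : (s1.all fun i => s2.contains i) = true <;>
        by_cases h2 : (s2.all fun i => s1.contains i) = true <;>
          simp_all <;> (split_ifs <;> tauto)

-- ===== VERDICT (by name: the statement is the Claim_ definition above) =====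
theorem isFullyContained_spec : Claim_equal_isFullyContained := by
  intro s1 s2 r _
  unfold Spec_isFullyContained
  exact main_eq r s1 s2
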